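-- pv_equiv track=rewrite | github.com/SKINIKE/Algorithm | 프로그래머스/lv0/120843. 공 던지기/공 던지기.py | solution
-- ===== SOURCE A (Python) =====
-- def solution(numbers, k):
--     a = 0
--
--     for i in range(0, k * 2, 2):
--         if i > len(numbers) - 1:
--             a = i % len(numbers)
--         else:
--             a = i
--     return numbers[a]
-- ===== SOURCE B (Python) =====
-- def solution(numbers, k):
--     if k >= 1:
--         return numbers[2 * (k - 1) % len(numbers)]
--     return numbers[0]
-- ===== Notes on version B (the rewrite author's own statement) =====
-- stated objective: faster
-- what changed: Replaces the O(k) simulation loop over range(0, 2k, 2) by the closed-form index 2*(k-1) % len(numbers), computed in O(1).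
import Mathlib
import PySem

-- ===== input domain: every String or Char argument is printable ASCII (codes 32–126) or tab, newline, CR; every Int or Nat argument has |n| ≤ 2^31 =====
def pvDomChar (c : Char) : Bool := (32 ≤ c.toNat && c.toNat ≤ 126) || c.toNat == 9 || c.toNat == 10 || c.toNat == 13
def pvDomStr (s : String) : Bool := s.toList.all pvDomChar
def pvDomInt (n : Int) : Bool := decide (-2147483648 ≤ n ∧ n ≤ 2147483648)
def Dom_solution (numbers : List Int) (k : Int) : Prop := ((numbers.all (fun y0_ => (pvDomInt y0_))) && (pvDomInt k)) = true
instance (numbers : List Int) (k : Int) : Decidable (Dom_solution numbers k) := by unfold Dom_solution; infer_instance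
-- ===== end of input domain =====

-- B replaces A's O(k) loop over range(0, 2*k, 2) by the closed-form index 2*(k-1) % len(numbers) (O(1)).


-- ===== PORT A =====
def solution (numbers : List Int) (k : Int) : Int :=
  let a : Int := (PySem.List.pyRange 0 (k * 2) 2).foldl
    (fun _a i =>
      if i > (numbers.length : Int) - 1 then PySem.Int.mod i (numbers.length : Int) else i) 0
  (PySem.List.pyGet? numbers a).getD 0

-- ===== PORT B =====
def solution_alt (numbers : List Int) (k : Int) : Int :=
  if 1 ≤ k then
    (PySem.List.pyGet? numbers (PySem.Int.mod (2 * (k - 1)) (numbers.length : Int))).getD 0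
  else
    (PySem.List.pyGet? numbers 0).getD 0

-- ===== PRECONDITION & SPEC =====
-- Pre_ excludes the empty list, on which Python A raises (ZeroDivisionError for k ≥ 1, IndexError otherwise).
def Pre_solution (numbers : List Int) (k : Int) : Prop := numbers ≠ []
instance (numbers : List Int) (k : Int) : Decidable (Pre_solution numbers k) := by
  unfold Pre_solution; infer_instance

def pvWitness_solution : List Int × Int := ([3, 7, 2], 4)

def Spec_solution (numbers : List Int) (k : Int) (out : Int) : Prop := out = solution_alt numbers k
instance (numbers : List Int) (k : Int) (out : Int) : Decidable (Spec_solution numbers k out) := by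
  unfold Spec_solution; infer_instance

-- ===== CLAIM (what is proved, stated in full; the proofs are below) =====
def Claim_equal_solution : Prop := ∀ (numbers : List Int) (k : Int),
  Dom_solution numbers k → Pre_solution numbers k → Spec_solution numbers k (solution numbers k)

-- ===== LEMMAS AND PROOFS =====

-- An accumulator-ignoring foldl returns the image of the last element (or the initial value).
lemma foldl_ignore_acc (f : Int → Int) :
    ∀ (xs : List Int) (x init : Int),
      (xs ++ [x]).foldl (fun _a i => f i) init = f x := by
  intro xs x init
  rw [List.foldl_append]
  rfl

lemma loop_index (n k : Int) (hn : 0 < n) (hk : 1 ≤ k) :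
    (PySem.List.pyRange 0 (k * 2) 2).foldl
      (fun _a i => if i > n - 1 then PySem.Int.mod i n else i) 0
      = PySem.Int.mod (2 * (k - 1)) n := by
  have h2 : (0 : Int) < 2 := by norm_num
  rw [PySem.List.pyRange_of_pos 0 (k * 2) h2]
  have hb : (0 : Int) < k * 2 := by omega
  have hcount : (if (0:Int) < k * 2 then ((k * 2 - 0 + 2 - 1) / 2).toNat else 0) = k.toNat := by
    rw [if_pos hb]
    omega
  rw [hcount]
  obtain ⟨m, hm⟩ : ∃ m : Nat, k.toNat = m + 1 := ⟨k.toNat - 1, by omega⟩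
  rw [hm, List.range_succ, List.map_append]
  simp only [List.map_cons, List.map_nil]
  rw [foldl_ignore_acc]
  have hmk : (0 : Int) + 2 * (m : Int) = 2 * (k - 1) := by omega
  rw [hmk]
  by_cases h : 2 * (k - 1) > n - 1
  · rw [if_pos h]
  · rw [if_neg h]
    rw [PySem.Int.mod_eq_emod_of_pos hn]
    exact (Int.emod_eq_of_lt (by omega) (by omega)).symm

-- ===== VERDICT (by name: the statement is the Claim_ definition above) =====
theorem solution_spec : Claim_equal_solution := by
  intro numbers k _hdom hpre
  unfold Spec_solution solution solution_alt
  have hn : (0 : Int) < (numbers.length : Int) := by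
    have : numbers.length ≠ 0 := fun h => hpre (List.eq_nil_of_length_eq_zero h)
    omega
  by_cases hk : 1 ≤ k
  · rw [if_pos hk, loop_index _ _ hn hk]
  · rw [if_neg hk]
    have hempty : PySem.List.pyRange 0 (k * 2) 2 = [] := by
      rw [PySem.List.pyRange_of_pos 0 (k * 2) (by norm_num)]
      rw [if_neg (by omega)]
      rfl
    rw [hempty]
    rfl
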